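-- pv_equiv track=rewrite | github.com/nagatou/ElementaryCS | progs/integers.py | comp_on_nat
-- ===== SOURCE A (Python) =====
-- def pred (x):
--   if (x<=0):
--     raise ValueError("OUT OF THE SET NAT")
--   else:
--     return(x-1)
--
-- def comp_on_nat (a,b):
--   if ((b==0) and (a>=0)):
--     return(0) # if a > b then set to zero
--   else:
--     if ((a==0) and (b>=0)):
--       return(1) # if a < b then set to non-zero
--     else:
--       return(comp_on_nat(pred(a),pred(b)))
-- ===== SOURCE B (Python) =====
-- def comp_on_nat(a, b):
--     return 0 if a >= b else 1
-- ===== Notes on version B (the rewrite author's own statement) =====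
-- stated objective: faster
-- what changed: Replaces the double-decrement recursion by the closed-form comparison 0 if a>=b else 1.
import Mathlib
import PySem

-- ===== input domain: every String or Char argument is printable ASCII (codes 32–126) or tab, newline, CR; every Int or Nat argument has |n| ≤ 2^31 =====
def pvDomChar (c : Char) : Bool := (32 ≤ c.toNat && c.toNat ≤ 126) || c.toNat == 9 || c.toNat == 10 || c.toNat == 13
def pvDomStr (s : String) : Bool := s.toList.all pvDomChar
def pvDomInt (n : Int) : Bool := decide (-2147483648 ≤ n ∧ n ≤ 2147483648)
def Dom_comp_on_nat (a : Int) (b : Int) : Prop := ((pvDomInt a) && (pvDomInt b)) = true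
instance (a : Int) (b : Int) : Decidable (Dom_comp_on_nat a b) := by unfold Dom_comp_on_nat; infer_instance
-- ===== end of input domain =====

-- B replaces A's double-decrement recursion by the closed-form comparison (faster; return value only).

-- ===== PORT A =====
-- A's recursion, step for step; `none` marks the inputs where pred raises ValueError
-- (excluded by Pre_), the final getD 0 only unwraps the value on Pre_ inputs.
def compOnNatA (a b : Int) : Option Int :=
  if b = 0 ∧ a ≥ 0 then some 0
  else if a = 0 ∧ b ≥ 0 then some 1
  else if 0 < a ∧ 0 < b then compOnNatA (a - 1) (b - 1)
  else none
termination_by (a.toNat + b.toNat)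
decreasing_by omega

def comp_on_nat (a : Int) (b : Int) : Int := (compOnNatA a b).getD 0

-- ===== PORT B =====
def comp_on_nat_alt (a : Int) (b : Int) : Int := if a ≥ b then 0 else 1

-- ===== PRECONDITION & SPEC =====
-- Pre_ excludes exactly the inputs (a<0 or b<0) on which A's pred raises ValueError.
def Pre_comp_on_nat (a : Int) (b : Int) : Prop := 0 ≤ a ∧ 0 ≤ b
instance (a : Int) (b : Int) : Decidable (Pre_comp_on_nat a b) := by unfold Pre_comp_on_nat; infer_instance
def pvWitness_comp_on_nat : Int × Int := (3, 5)

def Spec_comp_on_nat (a : Int) (b : Int) (out : Int) : Prop := out = comp_on_nat_alt a b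
instance (a : Int) (b : Int) (out : Int) : Decidable (Spec_comp_on_nat a b out) := by unfold Spec_comp_on_nat; infer_instance

-- ===== CLAIM (what is proved, stated in full; the proofs are below) =====
def Claim_equal_comp_on_nat : Prop := ∀ (a : Int) (b : Int), Dom_comp_on_nat a b → Pre_comp_on_nat a b → Spec_comp_on_nat a b (comp_on_nat a b)

-- ===== LEMMAS AND PROOFS =====
lemma compOnNatA_eq : ∀ (n : ℕ) (a b : Int), 0 ≤ a → 0 ≤ b → b.toNat = n →
    compOnNatA a b = some (if a ≥ b then 0 else 1) := by
  intro n
  induction n with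
  | zero =>
    intro a b ha hb h
    have hb0 : b = 0 := by omega
    subst hb0
    unfold compOnNatA
    rw [if_pos ⟨rfl, ha⟩, if_pos (by omega)]
  | succ k ih =>
    intro a b ha hb h
    have hbpos : 0 < b := by omega
    unfold compOnNatA
    rw [if_neg (by omega)]
    by_cases haz : a = 0
    · subst haz
      rw [if_pos ⟨rfl, by omega⟩, if_neg (by omega)]
    · have hapos : 0 < a := by omega
      rw [if_neg (by omega), if_pos ⟨hapos, hbpos⟩,
        ih (a - 1) (b - 1) (by omega) (by omega) (by omega)]
      congr 1
      by_cases hab : a ≥ b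
      · rw [if_pos (by omega), if_pos hab]
      · rw [if_neg (by omega), if_neg hab]

-- ===== VERDICT (by name: the statement is the Claim_ definition above) =====
theorem comp_on_nat_spec : Claim_equal_comp_on_nat := by
  intro a b _ hpre
  unfold Spec_comp_on_nat comp_on_nat comp_on_nat_alt
  rw [compOnNatA_eq b.toNat a b hpre.1 hpre.2 rfl]
  rfl
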